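-- pv_equiv track=rewrite | github.com/CLeonOS/wine | cleonos_wine_lib/runner.py | _parse_whitespace_items
-- ===== SOURCE A (Python) =====
-- from typing import Dict, List, Optional, Tuple
--
-- def _parse_whitespace_items(line: str, max_count: int) -> List[str]:
--     out: List[str] = []
--     i = 0
--     text = line or ""
--     length = len(text)
--
--     while i < length:
--         while i < length and text[i] in (" ", "\t", "\r", "\n"):
--             i += 1
--         if i >= length:
--             break
--         start = i
--         while i < length and text[i] not in (" ", "\t", "\r", "\n"):
--             i += 1
--         out.append(text[start:i])
--         if len(out) >= max_count:
--             break
--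
--     return out
-- ===== SOURCE B (Python) =====
-- from typing import List
--
-- def _parse_whitespace_items(line, max_count):
--     out: List[str] = []
--     for tok in (line or "").split():
--         out.append(tok)
--         if len(out) >= max_count:
--             break
--     return out
-- ===== Notes on version B (the rewrite author's own statement) =====
-- stated objective: idiomatic
-- what changed: Tokenization is delegated to the standard-library str.split() instead of A's hand-written index scanner with two nested inner while-loops; the cap becomes a plain for-loop over the token list that appends and breaks once the cap is reached.
import Mathlib
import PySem

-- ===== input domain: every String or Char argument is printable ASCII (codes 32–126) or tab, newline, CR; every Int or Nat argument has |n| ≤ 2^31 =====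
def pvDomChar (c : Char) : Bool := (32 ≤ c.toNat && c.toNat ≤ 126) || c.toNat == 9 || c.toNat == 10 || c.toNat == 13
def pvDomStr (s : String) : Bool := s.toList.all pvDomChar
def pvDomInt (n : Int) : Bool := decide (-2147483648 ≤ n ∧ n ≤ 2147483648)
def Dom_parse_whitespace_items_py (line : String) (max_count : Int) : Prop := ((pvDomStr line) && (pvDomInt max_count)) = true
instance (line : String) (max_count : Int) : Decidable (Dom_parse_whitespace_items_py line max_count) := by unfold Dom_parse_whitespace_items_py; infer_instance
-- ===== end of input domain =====

-- B delegates tokenization to the standard-library str.split() and caps with a plain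
-- for-loop over the token list, replacing A's index scanner with two nested while-loops
-- (idiomatic; exact on the ASCII domain, where str.split()'s whitespace coincides with
-- A's " \t\r\n").

-- ===== PORT A =====
-- membership test `text[i] in (" ", "\t", "\r", "\n")`
def pvAWS (c : Char) : Bool := c == ' ' || c == '\t' || c == '\r' || c == '\n'

-- inner while #1: advance i past whitespace (modelled on the remaining suffix)
def pvASkip : List Char → List Char
  | [] => []
  | c :: cs => if pvAWS c then pvASkip cs else c :: cs

-- inner while #2: advance i over non-whitespace; returns (text[start:i], rest)
def pvASpan : List Char → List Char × List Char
  | [] => ([], [])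
  | c :: cs =>
    if pvAWS c then ([], c :: cs)
    else
      let p := pvASpan cs
      (c :: p.1, p.2)

-- outer while loop; fuel = initial length makes the recursion total (each pass consumes ≥ 1 char)
def pvALoop : Nat → List Char → List String → Int → List String
  | 0, _, out, _ => out
  | f + 1, cs, out, mc =>
    match pvASkip cs with
    | [] => out
    | c :: rest =>
      let p := pvASpan (c :: rest)
      let out' := out ++ [String.ofList p.1]
      if mc ≤ (out'.length : Int) then out' else pvALoop f p.2 out' mc

def parse_whitespace_items_py (line : String) (max_count : Int) : List String :=
  pvALoop line.toList.length line.toList [] max_count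

-- ===== PORT B =====
-- `for tok in (line or "").split(): out.append(tok); if len(out) >= max_count: break`
def pvBLoop : List String → List String → Int → List String
  | [], out, _ => out
  | t :: ts, out, mc =>
    let out' := out ++ [t]
    if mc ≤ (out'.length : Int) then out' else pvBLoop ts out' mc

def parse_whitespace_items_py_alt (line : String) (max_count : Int) : List String :=
  pvBLoop (PySem.Str.split₀ line) [] max_count

-- ===== PRECONDITION & SPEC =====
def Spec_parse_whitespace_items_py (line : String) (max_count : Int) (out : List String) : Prop := out = parse_whitespace_items_py_alt line max_count
instance (line : String) (max_count : Int) (out : List String) : Decidable (Spec_parse_whitespace_items_py line max_count out) := by unfold Spec_parse_whitespace_items_py; infer_instance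

-- ===== CLAIM (what is proved, stated in full; the proofs are below) =====
def Claim_equal_parse_whitespace_items_py : Prop := ∀ (line : String) (max_count : Int), Dom_parse_whitespace_items_py line max_count → Spec_parse_whitespace_items_py line max_count (parse_whitespace_items_py line max_count)

-- ===== LEMMAS AND PROOFS =====

-- maximal runs of non-isspace characters (structural reference tokenizer)
def pvTok : List Char → List (List Char)
  | [] => []
  | c :: rest =>
    if PySem.Chars.isspace c then pvTok rest
    else
      match rest with
      | [] => [[c]]
      | d :: _ =>
        if PySem.Chars.isspace d then [c] :: pvTok rest
        else
          match pvTok rest with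
          | t :: ts => (c :: t) :: ts
          | [] => [[c]]

theorem pvTok_cons_cons (a b : Char) (l : List Char)
    (ha : PySem.Chars.isspace a = false) (hb : PySem.Chars.isspace b = false) :
    pvTok (a :: b :: l) =
      match pvTok (b :: l) with
      | t :: ts => (a :: t) :: ts
      | [] => [[a]] := by
  conv_lhs => rw [pvTok.eq_def]
  simp only [ha, hb, Bool.false_eq_true, if_false]

theorem pvTok_ws {c : Char} (h : PySem.Chars.isspace c = true) (rest : List Char) :
    pvTok (c :: rest) = pvTok rest := by
  simp [pvTok, h]

theorem pvTok_pre {pre : List Char} (hne : pre ≠ [])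
    (hnw : ∀ c ∈ pre, PySem.Chars.isspace c = false) :
    ∀ {d : Char}, PySem.Chars.isspace d = true →
      ∀ rest, pvTok (pre ++ d :: rest) = pre :: pvTok rest := by
  induction pre with
  | nil => simp at hne
  | cons a pre ih =>
    intro d hd rest
    have ha : PySem.Chars.isspace a = false := hnw a (by simp)
    cases pre with
    | nil => simp [pvTok, ha, hd]
    | cons b pre' =>
      have hb : PySem.Chars.isspace b = false := hnw b (by simp)
      have hih := ih (by simp) (fun c hc => hnw c (by simp [hc])) hd rest
      simp only [List.cons_append] at hih ⊢
      rw [pvTok_cons_cons a b _ ha hb, hih]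

theorem pvTok_all_nonws {pre : List Char} (hne : pre ≠ [])
    (hnw : ∀ c ∈ pre, PySem.Chars.isspace c = false) :
    pvTok pre = [pre] := by
  induction pre with
  | nil => simp at hne
  | cons a pre ih =>
    have ha : PySem.Chars.isspace a = false := hnw a (by simp)
    cases pre with
    | nil => simp [pvTok, ha]
    | cons b pre' =>
      have hb : PySem.Chars.isspace b = false := hnw b (by simp)
      have hih := ih (by simp) (fun c hc => hnw c (by simp [hc]))
      rw [pvTok_cons_cons a b _ ha hb, hih]

-- the split₀ worker computes pvTok
theorem split₀_go_eq (l : List Char) : ∀ cur acc,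
    (∀ c ∈ cur, PySem.Chars.isspace c = false) →
    PySem.Chars.split₀.go l cur acc = acc.reverse ++ pvTok (cur.reverse ++ l) := by
  induction l with
  | nil =>
    intro cur acc hnw
    by_cases hc : cur = []
    · subst hc; simp [PySem.Chars.split₀.go, pvTok]
    · have : cur.isEmpty = false := by simpa [List.isEmpty_iff] using hc
      simp [PySem.Chars.split₀.go, this,
        pvTok_all_nonws (pre := cur.reverse) (by simpa using hc)
          (fun c hc' => hnw c (by simpa using hc'))]
  | cons c rest ih =>
    intro cur acc hnw
    by_cases hws : PySem.Chars.isspace c = true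
    · by_cases hc : cur = []
      · subst hc
        simp only [PySem.Chars.split₀.go, hws, List.isEmpty_nil]
        simpa [pvTok_ws hws] using ih [] acc (by simp)
      · have hie : cur.isEmpty = false := by simpa [List.isEmpty_iff] using hc
        have h2 := pvTok_pre (pre := cur.reverse) (by simpa using hc)
          (fun x hx => hnw x (by simpa using hx)) hws rest
        simp only [PySem.Chars.split₀.go, hws, hie, Bool.false_eq_true, if_false, if_true]
        rw [ih [] (cur.reverse :: acc) (by simp)]
        simp [h2]
    · have hws' : PySem.Chars.isspace c = false := by simpa using hws
      simp only [PySem.Chars.split₀.go, hws', Bool.false_eq_true, if_false]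
      rw [ih (c :: cur) acc (by
        intro x hx
        rcases List.mem_cons.mp hx with h | h
        · subst h; exact hws'
        · exact hnw x h)]
      simp

theorem split₀_eq_pvTok (cs : List Char) : PySem.Chars.split₀ cs = pvTok cs := by
  simpa using split₀_go_eq cs [] [] (by simp)

-- characters with equal code points are equal
theorem pvCharEq (a b : Char) (h : a.toNat = b.toNat) : a = b := by
  apply Char.ext
  unfold Char.toNat at h
  exact UInt32.toNat_inj.mp h

theorem pvBeqNat (c x : Char) (n : Nat) (hx : x.toNat = n) : (c == x) = (c.toNat == n) := by
  rw [Bool.eq_iff_iff]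
  simp only [beq_iff_eq]
  constructor
  · intro h; subst h; exact hx
  · intro h; exact pvCharEq c x (by omega)

-- on the ASCII domain A's 4-character whitespace test agrees with Python's isspace
theorem pvAWS_eq_isspace {c : Char} (h : pvDomChar c = true) :
    pvAWS c = PySem.Chars.isspace c := by
  simp only [pvDomChar, Bool.or_eq_true, Bool.and_eq_true, beq_iff_eq,
    decide_eq_true_eq] at h
  simp only [pvAWS, PySem.Chars.isspace,
    pvBeqNat c ' ' 32 rfl, pvBeqNat c '\t' 9 rfl, pvBeqNat c '\r' 13 rfl,
    pvBeqNat c '\n' 10 rfl]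
  rw [Bool.eq_iff_iff]
  simp only [Bool.or_eq_true, beq_iff_eq, Bool.and_eq_true, decide_eq_true_eq]
  omega

-- all-whitespace lists tokenize to []
theorem pvTok_all_ws : ∀ (l : List Char), (∀ c ∈ l, PySem.Chars.isspace c = true) →
    pvTok l = []
  | [], _ => rfl
  | c :: l, h => by
    rw [pvTok_ws (h c (by simp))]
    exact pvTok_all_ws l (fun x hx => h x (by simp [hx]))

-- a leading all-whitespace prefix is irrelevant
theorem pvTok_append_ws : ∀ (pre l : List Char),
    (∀ c ∈ pre, PySem.Chars.isspace c = true) → pvTok (pre ++ l) = pvTok l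
  | [], _, _ => rfl
  | c :: pre, l, h => by
    rw [List.cons_append, pvTok_ws (h c (by simp))]
    exact pvTok_append_ws pre l (fun x hx => h x (by simp [hx]))

-- pvASkip facts
theorem pvASkip_spec (cs : List Char) :
    (∀ c ∈ cs, pvAWS c = true) ∧ pvASkip cs = []
    ∨ ∃ pre c rest, cs = pre ++ c :: rest ∧ (∀ x ∈ pre, pvAWS x = true) ∧
        pvAWS c = false ∧ pvASkip cs = c :: rest := by
  induction cs with
  | nil => exact Or.inl ⟨by simp, rfl⟩
  | cons a cs ih =>
    by_cases ha : pvAWS a = true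
    · rcases ih with ⟨h1, h2⟩ | ⟨pre, c, rest, h1, h2, h3, h4⟩
      · exact Or.inl ⟨by simpa [ha] using h1, by simp [pvASkip, ha, h2]⟩
      · exact Or.inr ⟨a :: pre, c, rest, by simp [h1], by simpa [ha] using h2, h3,
          by simp [pvASkip, ha, h4]⟩
    · exact Or.inr ⟨[], a, cs, by simp, by simp, by simpa using ha,
        by simp [pvASkip, ha]⟩

-- pvASpan facts for a non-whitespace head
theorem pvASpan_spec (cs : List Char) :
    cs = (pvASpan cs).1 ++ (pvASpan cs).2 ∧
    (∀ c ∈ (pvASpan cs).1, pvAWS c = false) ∧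
    ((pvASpan cs).2 = [] ∨ ∃ d rest', (pvASpan cs).2 = d :: rest' ∧ pvAWS d = true) := by
  induction cs with
  | nil => simp [pvASpan]
  | cons a cs ih =>
    by_cases ha : pvAWS a = true
    · exact ⟨by simp [pvASpan, ha], by simp [pvASpan, ha],
        Or.inr ⟨a, cs, by simp [pvASpan, ha], ha⟩⟩
    · refine ⟨?_, ?_, ?_⟩
      · simpa [pvASpan, ha] using ih.1
      · intro c hc
        simp only [pvASpan, ha, Bool.false_eq_true, if_false] at hc
        rcases List.mem_cons.mp hc with h | h
        · subst h; simpa using ha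
        · exact ih.2.1 c h
      · simpa [pvASpan, ha] using ih.2.2

-- the A loop, characterised by pvTok on the ASCII domain
theorem pvALoop_eq : ∀ (f : Nat) (cs : List Char) (out : List String) (mc : Int),
    cs.length ≤ f → (∀ c ∈ cs, pvDomChar c = true) →
    pvALoop f cs out mc =
      out ++ ((pvTok cs).map String.ofList).take (max (mc - out.length) 1).toNat := by
  intro f
  induction f with
  | zero =>
    intro cs out mc hf _
    have : cs = [] := List.length_eq_zero_iff.mp (Nat.le_zero.mp hf)
    simp [this, pvALoop, pvTok]
  | succ f ih =>
    intro cs out mc hf hdom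
    have hwseq : ∀ c ∈ cs, pvAWS c = PySem.Chars.isspace c :=
      fun c hc => pvAWS_eq_isspace (hdom c hc)
    rcases pvASkip_spec cs with ⟨hall, hskip⟩ | ⟨pre, c, rest, hcs, hpre, hc, hskip⟩
    · -- everything whitespace: token list is empty
      have htok : pvTok cs = [] :=
        pvTok_all_ws cs (fun c hc => by rw [← hwseq c hc]; exact hall c hc)
      simp [pvALoop, hskip, htok]
    · -- a token starts at c
      subst hcs
      have hwstail : ∀ x ∈ c :: rest, pvAWS x = PySem.Chars.isspace x :=
        fun x hx => hwseq x (by simp [hx])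
      have htokdrop : pvTok (pre ++ c :: rest) = pvTok (c :: rest) :=
        pvTok_append_ws pre (c :: rest)
          (fun x hx => by rw [← hwseq x (by simp [hx])]; exact hpre x hx)
      obtain ⟨hsplit, htnw, hrest⟩ := pvASpan_spec (c :: rest)
      set t := (pvASpan (c :: rest)).1 with ht
      set r := (pvASpan (c :: rest)).2 with hr
      have hmemt : ∀ x ∈ t, x ∈ c :: rest := fun x hx =>
        hsplit ▸ List.mem_append.mpr (Or.inl hx)
      have hmemr : ∀ x ∈ r, x ∈ c :: rest := fun x hx =>
        hsplit ▸ List.mem_append.mpr (Or.inr hx)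
      have htne : t ≠ [] := by
        intro h
        rw [h, List.nil_append] at hsplit
        rcases hrest with h' | ⟨d, rest', hd, hdws⟩
        · rw [← hsplit] at h'; exact absurd h' (by simp)
        · rw [← hsplit] at hd
          injection hd with h1 _
          rw [← h1] at hdws
          rw [hdws] at hc
          exact absurd hc (by simp)
      have htnwsp : ∀ x ∈ t, PySem.Chars.isspace x = false :=
        fun x hx => (hwstail x (hmemt x hx)) ▸ htnw x hx
      -- pvTok (c :: rest) = t :: pvTok r
      have htokhead : pvTok (c :: rest) = t :: pvTok r := by
        rcases hrest with h' | ⟨d, rest', hd, hdws⟩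
        · rw [hsplit, h', List.append_nil, pvTok_all_nonws htne htnwsp]
          simp [pvTok]
        · have hdws' : PySem.Chars.isspace d = true := by
            rw [← hwstail d (hmemr d (by simp [hd]))]; exact hdws
          rw [hsplit, hd, pvTok_pre htne htnwsp hdws' rest', pvTok_ws hdws']
      have hrlen : r.length < (c :: rest).length := by
        have := congrArg List.length hsplit
        simp only [List.length_append] at this
        have ht1 : 0 < t.length := List.length_pos_of_ne_nil htne
        simp only [List.length_cons] at this ⊢
        omega
      have hflen : r.length ≤ f := by
        have : (c :: rest).length ≤ (pre ++ c :: rest).length := by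
          simp [List.length_append]
        simp only [List.length_cons] at this hrlen
        simp only [List.length_append, List.length_cons] at hf
        omega
      have hdomr : ∀ x ∈ r, pvDomChar x = true := fun x hx =>
        hdom x (by simp [hmemr x hx])
      rw [htokdrop, htokhead]
      simp only [pvALoop, hskip]
      by_cases hstop : mc ≤ ((out ++ [String.ofList t]).length : Int)
      · have hn : (max (mc - out.length) 1).toNat = 1 := by
          simp only [List.length_append, List.length_cons, List.length_nil] at hstop
          omega
        rw [if_pos hstop, hn]
        simp [← ht]
      · rw [if_neg hstop]
        rw [ih r (out ++ [String.ofList t]) mc hflen hdomr]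
        have hn : (max (mc - out.length) 1).toNat =
            (max (mc - (out ++ [String.ofList t]).length) 1).toNat + 1 := by
          simp only [List.length_append, List.length_cons, List.length_nil] at hstop ⊢
          push_cast at hstop ⊢
          omega
        rw [hn]
        simp [List.take_succ_cons]

-- the B loop, characterised by the same take-formula
theorem pvBLoop_eq : ∀ (ts out : List String) (mc : Int),
    pvBLoop ts out mc = out ++ ts.take (max (mc - out.length) 1).toNat := by
  intro ts
  induction ts with
  | nil => intro out mc; simp [pvBLoop]
  | cons t ts ih =>
    intro out mc
    simp only [pvBLoop]
    by_cases hstop : mc ≤ ((out ++ [t]).length : Int)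
    · have hn : (max (mc - out.length) 1).toNat = 1 := by
        simp only [List.length_append, List.length_cons, List.length_nil] at hstop
        omega
      rw [if_pos hstop, hn]
      simp
    · rw [if_neg hstop, ih]
      have hn : (max (mc - out.length) 1).toNat =
          (max (mc - (out ++ [t]).length) 1).toNat + 1 := by
        simp only [List.length_append, List.length_cons, List.length_nil] at hstop ⊢
        push_cast at hstop ⊢
        omega
      rw [hn]
      simp [List.take_succ_cons]

-- ===== VERDICT (by name: the statement is the Claim_ definition above) =====
theorem parse_whitespace_items_py_spec : Claim_equal_parse_whitespace_items_py := by
  intro line mc hdom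
  unfold Spec_parse_whitespace_items_py
  have hdc : ∀ c ∈ line.toList, pvDomChar c = true := by
    unfold Dom_parse_whitespace_items_py at hdom
    rw [Bool.and_eq_true] at hdom
    simpa [pvDomStr, List.all_eq_true] using hdom.1
  rw [parse_whitespace_items_py, pvALoop_eq _ _ _ _ le_rfl hdc]
  rw [parse_whitespace_items_py_alt, pvBLoop_eq]
  simp only [PySem.Str.split₀, split₀_eq_pvTok]
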